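-- pv_equiv track=rewrite | github.com/changpil/pyPractice | 2. Coding Interviews/InterviewQuestions/permutationswithoperators.py | foo
-- ===== SOURCE A (Python) =====
-- def perm(input, i):
--     if i >= len(input):
--         return [[]]
--
--     pre = perm(input, i+1)
--     result = []
--     for l in pre:
--         for j in range(len(l)+1):
--             tmp = l[:j] + [input[i]] + l[j:]
--             result.append(tmp)
--     return result
--
-- def operation(l, i, tmp, store):
--     if i >= len(l):
--         store.append("".join(tmp))
--         return
--
--     if i == 0:
--         tmp.append(l[i])
--         operation(l, i + 1, tmp, store)
--         tmp.pop()
--     else: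
--         for op in "+-*/":
--             tmp.append(op + l[i])
--             operation(l, i + 1, tmp, store)
--             tmp.pop()
--
-- def foo(input):
--     rel = []
--     s = set()
--     ll = []
--     tmp = []
--
--     #getPermutation(input, 0, s, tmp, ll)
--     ll = perm(input, 0)
--     for l in ll:
--         strl = list(map(lambda x: str(x), l))
--         tmps = []
--         store = []
--         operation(strl, 0, tmps, store)
--         rel.extend(store)
--         store.clear()
--
--     return rel
-- ===== SOURCE B (Python) =====
-- def foo(input):
--     # build permutations iteratively, end-to-front, matching insertion order
--     perms = [[]]
--     for x in reversed(input):
--         perms = [p[:j] + [x] + p[j:] for p in perms for j in range(len(p) + 1)]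
--     out = []
--     for p in perms:
--         strs = [str(v) for v in p]
--         exprs = [strs[0]] if strs else ['']
--         for s in strs[1:]:
--             exprs = [e + op + s for e in exprs for op in "+-*/"]
--         out.extend(exprs)
--     return out
-- ===== Notes on version B (the rewrite author's own statement) =====
-- stated objective: idiomatic
-- what changed: Replaces A's two recursions (index recursion for permutations, DFS with a shared mutable tmp/store for operators) by iterative comprehension folds: permutations grown by inserting each element of the reversed input at every position, and operator expressions grown breadth-wise by expanding the partial-expression list one element at a time.
import Mathlib
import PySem

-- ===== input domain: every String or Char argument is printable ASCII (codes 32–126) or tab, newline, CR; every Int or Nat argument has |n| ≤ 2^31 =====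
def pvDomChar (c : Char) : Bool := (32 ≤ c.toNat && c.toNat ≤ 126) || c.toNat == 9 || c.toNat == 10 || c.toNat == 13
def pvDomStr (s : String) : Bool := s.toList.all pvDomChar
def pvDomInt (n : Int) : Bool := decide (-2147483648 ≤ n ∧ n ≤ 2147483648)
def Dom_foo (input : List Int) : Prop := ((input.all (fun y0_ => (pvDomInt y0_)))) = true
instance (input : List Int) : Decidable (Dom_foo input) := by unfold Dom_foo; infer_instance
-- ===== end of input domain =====

-- B replaces A's two recursions by iterative folds: permutations built by a fold over the
-- reversed input, operator strings by breadth-wise expansion; objective: idiomatic/alternative.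

-- ===== PORT A =====
-- perm(input, i): recursion on i; l[:j] / l[j:] ported as take/drop (exact: j ∈ [0, len l]),
-- input[i] as getD (exact: the branch guarantees i < len input).
def fooPerm (input : List Int) (i : Nat) : List (List Int) :=
  if input.length ≤ i then [[]]
  else
    let pre := fooPerm input (i + 1)
    pre.foldl (fun result l =>
      result ++ (List.range (l.length + 1)).map
        (fun j => l.take j ++ [input.getD i 0] ++ l.drop j)) []
termination_by input.length - i

-- operation(l, i, tmp, store): returns the strings it appends to store.
def fooOp (l : List String) (i : Nat) (tmp : List String) : List String :=
  if l.length ≤ i then [PySem.Str.join "" tmp]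
  else if i = 0 then fooOp l (i + 1) (tmp ++ [l.getD i ""])
  else
    "+-*/".toList.foldl
      (fun store op => store ++ fooOp l (i + 1) (tmp ++ [op.toString ++ l.getD i ""])) []
termination_by l.length - i

def foo (input : List Int) : List String :=
  (fooPerm input 0).foldl
    (fun rel l => rel ++ fooOp (l.map (fun x => PySem.Int.toStr x)) 0 []) []

-- ===== PORT B =====
def foo_alt (input : List Int) : List String :=
  let perms := input.reverse.foldl
    (fun ps x => ps.flatMap (fun p =>
      (List.range (p.length + 1)).map (fun j => p.take j ++ [x] ++ p.drop j))) [[]]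
  perms.flatMap (fun p =>
    let strs := p.map (fun v => PySem.Int.toStr v)
    let init : List String := match strs with
      | [] => [""]
      | s0 :: _ => [s0]
    (strs.drop 1).foldl
      (fun es s => es.flatMap (fun e => "+-*/".toList.map (fun op => e ++ op.toString ++ s)))
      init)

-- ===== PRECONDITION & SPEC =====
def Spec_foo (input : List Int) (out : List String) : Prop := out = foo_alt input
instance (input : List Int) (out : List String) : Decidable (Spec_foo input out) := by unfold Spec_foo; infer_instance

-- ===== CLAIM (what is proved, stated in full; the proofs are below) =====
def Claim_equal_foo : Prop := ∀ (input : List Int), Dom_foo input → Spec_foo input (foo input)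

-- ===== LEMMAS AND PROOFS =====

-- "".join over List Char is flatten
theorem pvJoinChars (a : List (List Char)) : PySem.Chars.join [] a = a.flatten := by
  show List.intercalate [] a = a.flatten
  induction a with
  | nil => simp [List.intercalate]
  | cons h tl ih => cases tl with
    | nil => simp [List.intercalate]
    | cons h2 t2 =>
      simp [List.intercalate, List.intersperse] at *
      simpa using ih

theorem pvJoinAppend (a : List String) (s : String) :
    PySem.Str.join "" (a ++ [s]) = PySem.Str.join "" a ++ s := by
  simp [PySem.Str.join, pvJoinChars]

theorem pvJoinSingle (s : String) : PySem.Str.join "" [s] = s := by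
  simp [PySem.Str.join]

-- the permutation-building step shared syntactically by both ports
def pvStep (ps : List (List Int)) (x : Int) : List (List Int) :=
  ps.flatMap (fun p => (List.range (p.length + 1)).map (fun j => p.take j ++ [x] ++ p.drop j))

def pvPermL : List Int → List (List Int)
  | [] => [[]]
  | x :: xs => pvStep (pvPermL xs) x

theorem pvPermA (n : Nat) (input : List Int) (i : Nat) (hn : input.length - i ≤ n) :
    fooPerm input i = pvPermL (input.drop i) := by
  induction n generalizing i with
  | zero =>
    have h : input.length ≤ i := by omega
    rw [fooPerm]
    simp [h, List.drop_eq_nil_of_le h, pvPermL]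
  | succ n ih =>
    by_cases h : input.length ≤ i
    · rw [fooPerm]; simp [h, List.drop_eq_nil_of_le h, pvPermL]
    · have hlt : i < input.length := by omega
      rw [fooPerm]
      simp only [h, if_false]
      rw [ih (i + 1) (by omega)]
      rw [List.drop_eq_getElem_cons hlt]
      simp [pvPermL, pvStep, List.flatMap_def,
        List.getD_eq_getElem?_getD, List.getElem?_eq_getElem hlt]

theorem pvPermB (xs : List Int) :
    xs.reverse.foldl pvStep [[]] = pvPermL xs := by
  induction xs with
  | nil => rfl
  | cons x t ih => simp [List.foldl_append, ih, pvPermL]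

-- the operator-expansion step
def pvOpStep (es : List String) (s : String) : List String :=
  es.flatMap (fun e => "+-*/".toList.map (fun op => e ++ op.toString ++ s))

theorem pvOpStepSeeds (xs : List String) (seeds : List String) :
    xs.foldl pvOpStep seeds = seeds.flatMap (fun e => xs.foldl pvOpStep [e]) := by
  induction xs generalizing seeds with
  | nil => simp
  | cons x t ih =>
    simp only [List.foldl_cons]
    rw [ih (pvOpStep seeds x)]
    have hrhs : ∀ e, List.foldl pvOpStep (pvOpStep [e] x) t
        = (pvOpStep [e] x).flatMap (fun e' => List.foldl pvOpStep [e'] t) := fun e => ih _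
    simp only [hrhs]
    have hsplit : pvOpStep seeds x = seeds.flatMap (fun e => pvOpStep [e] x) := by
      simp [pvOpStep]
    rw [hsplit, List.flatMap_assoc]

theorem pvOpRec (n : Nat) (l : List String) (i : Nat) (tmp : List String)
    (hn : l.length - i ≤ n) (h1 : 1 ≤ i) :
    fooOp l i tmp = (l.drop i).foldl pvOpStep [PySem.Str.join "" tmp] := by
  induction n generalizing i tmp with
  | zero =>
    have h : l.length ≤ i := by omega
    rw [fooOp]
    simp [h, List.drop_eq_nil_of_le h]
  | succ n ih =>
    by_cases h : l.length ≤ i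
    · rw [fooOp]; simp [h, List.drop_eq_nil_of_le h]
    · have hlt : i < l.length := by omega
      have hne : i ≠ 0 := by omega
      rw [fooOp]
      simp only [h, if_false, hne]
      rw [List.drop_eq_getElem_cons hlt, List.foldl_cons, pvOpStepSeeds]
      have hstep : pvOpStep [PySem.Str.join "" tmp] l[i]
          = "+-*/".toList.map (fun op => PySem.Str.join "" tmp ++ op.toString ++ l[i]) := by
        simp [pvOpStep]
      rw [hstep, List.flatMap_map, PySem.List.foldl_append_eq_flatMap]
      simp only [List.nil_append]
      apply List.flatMap_congr
      intro op _
      have hg : l.getD i "" = l[i] := by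
        simp [List.getD_eq_getElem?_getD, List.getElem?_eq_getElem hlt]
      rw [ih (i + 1) _ (by omega) (by omega), pvJoinAppend, hg, String.append_assoc]

theorem pvOpZero (l : List String) :
    fooOp l 0 [] =
      (l.drop 1).foldl pvOpStep
        (match l with | [] => [""] | s0 :: _ => [s0]) := by
  cases l with
  | nil =>
    rw [fooOp]
    simp [PySem.Str.join]
  | cons s0 t =>
    rw [fooOp]
    have h0 : ¬ (s0 :: t).length ≤ 0 := by simp
    rw [if_neg h0, if_pos rfl]
    rw [pvOpRec (t.length) _ 1 _ (by simp) (by omega)]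
    simp [pvJoinSingle]

-- ===== VERDICT (by name: the statement is the Claim_ definition above) =====
theorem foo_spec : Claim_equal_foo := by
  intro input _
  show foo input = foo_alt input
  unfold foo foo_alt
  rw [pvPermA (input.length) input 0 (by omega), List.drop_zero]
  rw [PySem.List.foldl_append_eq_flatMap]
  simp only [List.nil_append]
  have hperm : input.reverse.foldl
      (fun ps x => ps.flatMap (fun p =>
        (List.range (p.length + 1)).map (fun j => p.take j ++ [x] ++ p.drop j))) [[]]
      = pvPermL input := pvPermB input
  rw [hperm]
  apply List.flatMap_congr
  intro p _
  rw [pvOpZero]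
  cases p with
  | nil => rfl
  | cons v t => rfl
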